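-- pv_equiv track=rewrite | github.com/Zakura0/AoC24 | d07/d07p1.py | checkSolvable
-- ===== SOURCE A (Python) =====
-- def checkSolvable(value, nums):
--     if len(nums) == 1:
--         return value == nums[0]
--     cut_nums = nums[:-1]
--     if len(nums) > 0 and value % nums[-1] == 0:
--         div = value // nums[-1]
--         if checkSolvable(div, cut_nums):
--             return True
--     if len(nums) > 0 and value > nums[-1]:
--         sub = value - nums[-1]
--         if checkSolvable(sub, cut_nums):
--             return True
--     return False
-- ===== SOURCE B (Python) =====
-- def checkSolvable(value, nums):
--     if not nums:
--         return False
--     reachable = {nums[0]}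
--     for num in nums[1:]:
--         reachable = {r * num for r in reachable} | {r + num for r in reachable if r > 0}
--     return value in reachable
-- ===== Notes on version B (the rewrite author's own statement) =====
-- stated objective: alternative
-- what changed: Backward branching recursion on the last operand is replaced by a single forward pass that maintains the set of reachable intermediate values (multiply always, add only when the previous value is positive, mirroring A's value>last guard) and finally tests membership.
-- outside the precondition, e.g. on checkSolvable(2, [2, 0, 3]): A returns False, B returns False
import Mathlib
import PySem

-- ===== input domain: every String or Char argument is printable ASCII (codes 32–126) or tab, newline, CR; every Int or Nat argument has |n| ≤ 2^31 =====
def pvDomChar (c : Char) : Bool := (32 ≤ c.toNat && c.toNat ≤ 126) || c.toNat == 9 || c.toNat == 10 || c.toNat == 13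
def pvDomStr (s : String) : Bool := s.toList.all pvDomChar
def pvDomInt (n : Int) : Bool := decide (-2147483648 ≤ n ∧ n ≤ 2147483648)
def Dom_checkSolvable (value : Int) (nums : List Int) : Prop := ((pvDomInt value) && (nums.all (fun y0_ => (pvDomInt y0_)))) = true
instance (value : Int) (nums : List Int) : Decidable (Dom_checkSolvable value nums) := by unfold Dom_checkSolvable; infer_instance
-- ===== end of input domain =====

-- B replaces A's backward branching recursion by a forward reachable-set pass (alternative algorithm, same result).


-- ===== PORT A =====
-- literal transliteration of A; nums[:-1] is PySem.List.slice nums none (some (-1)),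
-- nums[-1] is PySem.List.pyGet? nums (-1): the 'none' branch is exactly nums = [],
-- where both 'len(nums) > 0 and …' guards are false and A returns False.
def checkSolvable (value : Int) (nums : List Int) : Bool :=
  if nums.length = 1 then
    decide (PySem.List.pyGet? nums 0 = some value)
  else
    let cut := PySem.List.slice nums none (some (-1))
    match h : PySem.List.pyGet? nums (-1) with
    | none => false
    | some last =>
      if PySem.Int.mod value last = 0 &&
          checkSolvable (PySem.Int.floordiv value last) cut then true
      else if value > last && checkSolvable (value - last) cut then true
      else false
termination_by nums.length
decreasing_by
  all_goals
    have hne : nums ≠ [] := by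
      intro hnil; subst hnil; simp [PySem.List.pyGet?, PySem.List.pyIdx?] at h
    simp only [PySem.List.slice_to_neg_one, List.length_dropLast]
    have : 0 < nums.length := List.length_pos_iff.mpr hne
    omega

-- ===== PORT B =====
-- one step of B's loop: {r*num for r in R} | {r+num for r in R if r > 0}
def csStep (R : PySem.Set Int) (num : Int) : PySem.Set Int :=
  PySem.Set.union (PySem.Set.ofList (R.map (fun r => r * num)))
    ((R.filter (fun r => decide (0 < r))).map (fun r => r + num))

def checkSolvable_alt (value : Int) (nums : List Int) : Bool :=
  match nums with
  | [] => false
  | n0 :: rest => PySem.Set.contains (rest.foldl csStep (PySem.Set.ofList [n0])) value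

-- ===== PRECONDITION & SPEC =====
-- Pre_ excludes lists with a 0 after the first element: there A evaluates 'value % 0' and raises
-- ZeroDivisionError whenever the recursion reaches that zero; on the remaining such inputs A happens
-- to return False before reaching it (see cite), so the whole zero-tail region is excluded.
def Pre_checkSolvable (value : Int) (nums : List Int) : Prop := (0 : Int) ∉ nums.drop 1
instance (value : Int) (nums : List Int) : Decidable (Pre_checkSolvable value nums) := by
  unfold Pre_checkSolvable; infer_instance

def pvWitness_checkSolvable : Int × List Int := (6, [2, 3])

def Spec_checkSolvable (value : Int) (nums : List Int) (out : Bool) : Prop := out = checkSolvable_alt value nums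
instance (value : Int) (nums : List Int) (out : Bool) : Decidable (Spec_checkSolvable value nums out) := by unfold Spec_checkSolvable; infer_instance

-- ===== CLAIM (what is proved, stated in full; the proofs are below) =====
def Claim_equal_checkSolvable : Prop := ∀ (value : Int) (nums : List Int), Dom_checkSolvable value nums → Pre_checkSolvable value nums → Spec_checkSolvable value nums (checkSolvable value nums)

-- ===== LEMMAS AND PROOFS =====

lemma mem_csStep (R : PySem.Set Int) (num v : Int) :
    v ∈ csStep R num ↔ (∃ r ∈ R, v = r * num) ∨ (∃ r ∈ R, 0 < r ∧ v = r + num) := by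
  simp only [csStep, PySem.Set.mem_union, PySem.Set.mem_ofList, List.mem_map, List.mem_filter]
  constructor
  · rintro (⟨r, hr, rfl⟩ | ⟨r, ⟨hr, hpos⟩, rfl⟩)
    · exact Or.inl ⟨r, hr, rfl⟩
    · exact Or.inr ⟨r, hr, by simpa using hpos, rfl⟩
  · rintro (⟨r, hr, rfl⟩ | ⟨r, hr, hpos, rfl⟩)
    · exact Or.inl ⟨r, hr, rfl⟩
    · exact Or.inr ⟨r, ⟨hr, by simpa using hpos⟩, rfl⟩

-- the arithmetic heart: for last ≠ 0, A's two backward branches are exactly B's two forward images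
lemma branch_iff (R : PySem.Set Int) (v last : Int) (hl : last ≠ 0) :
    ((PySem.Int.mod v last = 0 ∧ PySem.Int.floordiv v last ∈ R) ∨ (v > last ∧ v - last ∈ R))
      ↔ v ∈ csStep R last := by
  rw [mem_csStep]
  constructor
  · rintro (⟨hm, hdiv⟩ | ⟨hgt, hsub⟩)
    · refine Or.inl ⟨PySem.Int.floordiv v last, hdiv, ?_⟩
      have := PySem.Int.floordiv_mul_add_mod v last
      omega
    · exact Or.inr ⟨v - last, hsub, by omega, by omega⟩
  · rintro (⟨r, hr, rfl⟩ | ⟨r, hr, hpos, rfl⟩)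
    · left
      have hm : PySem.Int.mod (r * last) last = 0 :=
        (PySem.Int.mod_eq_zero_iff_dvd _ _).mpr ⟨r, mul_comm r last⟩
      have heq := PySem.Int.floordiv_mul_add_mod (r * last) last
      rw [hm] at heq
      have hfd : PySem.Int.floordiv (r * last) last = r := by
        exact mul_right_cancel₀ hl (by linarith : PySem.Int.floordiv (r * last) last * last = r * last)
      exact ⟨hm, by rw [hfd]; exact hr⟩
    · exact Or.inr ⟨by omega, by simpa using hr⟩

-- main invariant: A on n0 :: rest agrees with membership in B's reachable set, by reverse induction on rest
lemma main_iff (rest : List Int) (n0 : Int) (h0 : (0 : Int) ∉ rest) (v : Int) :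
    checkSolvable v (n0 :: rest) = true ↔ v ∈ rest.foldl csStep (PySem.Set.ofList [n0]) := by
  induction rest using List.reverseRecOn generalizing v with
  | nil =>
    simp [checkSolvable, PySem.List.pyGet?, PySem.List.pyIdx?, PySem.Set.mem_ofList, eq_comm]
  | append_singleton rs last ih =>
    have h0rs : (0 : Int) ∉ rs := fun h => h0 (by simp [h])
    have hlast : last ≠ 0 := fun h => h0 (by simp [h])
    have hlen : (n0 :: (rs ++ [last])).length ≠ 1 := by simp
    have hget : PySem.List.pyGet? (n0 :: (rs ++ [last])) (-1) = some last := by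
      have : n0 :: (rs ++ [last]) = (n0 :: rs) ++ [last] := by simp
      rw [this]
      simp [PySem.List.pyGet?, PySem.List.pyIdx?]
    have hcut : PySem.List.slice (n0 :: (rs ++ [last])) none (some (-1)) = n0 :: rs := by
      rw [PySem.List.slice_to_neg_one,
        show n0 :: (rs ++ [last]) = (n0 :: rs) ++ [last] by simp, List.dropLast_concat]
    have key := branch_iff (List.foldl csStep (PySem.Set.ofList [n0]) rs) v last hlast
    rw [checkSolvable, if_neg hlen]
    simp only [hcut]
    rw [List.foldl_append]
    simp only [List.foldl]
    rw [← key]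
    split
    next heq => rw [hget] at heq; exact absurd heq (by simp)
    next l1 heq =>
      rw [hget] at heq
      injection heq with heq'
      subst heq'
      constructor
      · intro h
        split_ifs at h with h1 h2
        · rcases Bool.and_eq_true_iff.mp h1 with ⟨hm, hrec⟩
          exact Or.inl ⟨by simpa using hm, (ih h0rs _).mp hrec⟩
        · rcases Bool.and_eq_true_iff.mp h2 with ⟨hgt, hrec⟩
          exact Or.inr ⟨by simpa using hgt, (ih h0rs _).mp hrec⟩
      · rintro (⟨hm, hrec⟩ | ⟨hgt, hrec⟩)
        · simp [hm, (ih h0rs _).mpr hrec]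
        · split_ifs with h1 h2
          · rfl
          · rfl
          · exact absurd (by simp [hgt, (ih h0rs _).mpr hrec]) h2

-- ===== VERDICT (by name: the statement is the Claim_ definition above) =====
theorem checkSolvable_spec : Claim_equal_checkSolvable := by
  intro value nums _ hpre
  unfold Spec_checkSolvable
  cases nums with
  | nil => simp [checkSolvable, checkSolvable_alt, PySem.List.pyGet?, PySem.List.pyIdx?]
  | cons n0 rest =>
    have h0 : (0 : Int) ∉ rest := by simpa [Pre_checkSolvable] using hpre
    have h := main_iff rest n0 h0 value
    unfold checkSolvable_alt
    rw [Bool.eq_iff_iff, h, PySem.Set.contains_iff]
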